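-- pv_equiv track=rewrite | github.com/niplav/site | code/champagne/repair_operator.py | pair_idx_to_disks
-- ===== SOURCE A (Python) =====
-- def pair_idx_to_disks(pair_idx, n_disks):
--     """
--     Convert lexicographic pair index to (i, j).
--
--     Pairs are indexed: (0,1), (0,2), ..., (0,n-1), (1,2), ..., (n-2,n-1)
--
--     Args:
--         pair_idx: Pair index in lexicographic order
--         n_disks: Number of disks
--
--     Returns:
--         (i, j): Disk indices
--     """
--     count = 0
--     for i in range(n_disks):
--         for j in range(i+1, n_disks):
--             if count == pair_idx:
--                 return i, j
--             count += 1
--     raise ValueError(f"Invalid pair_idx {pair_idx} for n_disks {n_disks}")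
-- ===== SOURCE B (Python) =====
-- import math
--
-- def pair_idx_to_disks(pair_idx, n_disks):
--     """Closed-form inverse of the lexicographic pair indexing via inverse triangular numbers."""
--     total = n_disks * (n_disks - 1) // 2
--     if not (0 <= pair_idx < total):
--         raise ValueError(f"Invalid pair_idx {pair_idx} for n_disks {n_disks}")
--     r = total - 1 - pair_idx
--     k = (math.isqrt(8 * r + 1) - 1) // 2
--     i = n_disks - 2 - k
--     j = pair_idx - i * (2 * n_disks - i - 1) // 2 + i + 1
--     return i, j
-- ===== Notes on version B (the rewrite author's own statement) =====
-- stated objective: faster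
-- what changed: Replaced A's O(n^2) nested scan counting pairs one by one with O(1) closed-form inverse-triangular-number arithmetic using math.isqrt, keeping the same bounds check (ValueError) on invalid indices.
import Mathlib
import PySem

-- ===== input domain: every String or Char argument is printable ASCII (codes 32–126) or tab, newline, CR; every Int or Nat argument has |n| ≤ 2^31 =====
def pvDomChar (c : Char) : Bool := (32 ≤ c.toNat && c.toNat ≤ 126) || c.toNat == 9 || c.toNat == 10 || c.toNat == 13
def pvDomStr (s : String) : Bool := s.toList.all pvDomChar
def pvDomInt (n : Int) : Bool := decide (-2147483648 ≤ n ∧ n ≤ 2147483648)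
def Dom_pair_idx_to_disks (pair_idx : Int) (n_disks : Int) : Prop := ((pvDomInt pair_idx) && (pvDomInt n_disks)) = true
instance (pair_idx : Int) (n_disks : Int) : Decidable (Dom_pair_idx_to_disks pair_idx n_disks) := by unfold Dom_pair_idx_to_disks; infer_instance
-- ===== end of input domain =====

-- B replaces A's O(n^2) nested search loop by O(1) closed-form inverse-triangular arithmetic (isqrt).
-- Equivalence is claimed on Pre_ = exactly the inputs where A returns (elsewhere both Pythons raise ValueError).

-- ===== PORT A =====
-- inner loop: `for j in range(i+1, n_disks): if count == pair_idx: return i, j; count += 1`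
-- (fuel = number of remaining range elements, the standard transcription of a Python for-range loop)
def pvInnerA (p i : Int) : Nat → Int → Int → Option (List Int) × Int
  | 0, _, count => (none, count)
  | fuel + 1, j, count =>
      if count = p then (some [i, j], count) else pvInnerA p i fuel (j + 1) (count + 1)

-- outer loop: `for i in range(n_disks): …`; `none` at the end is the ValueError path
def pvOuterA (p n : Int) : Nat → Int → Int → Option (List Int)
  | 0, _, _ => none
  | fuel + 1, i, count =>
      match pvInnerA p i (n - (i + 1)).toNat (i + 1) count with
      | (some v, _) => some v
      | (none, c) => pvOuterA p n fuel (i + 1) c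

def pair_idx_to_disks (pair_idx : Int) (n_disks : Int) : List Int :=
  (pvOuterA pair_idx n_disks n_disks.toNat 0 0).getD []

-- ===== PORT B =====
-- math.isqrt on a nonnegative int is exactly Nat.sqrt (the branch guarantees 8*r+1 ≥ 1)
def pair_idx_to_disks_alt (pair_idx : Int) (n_disks : Int) : List Int :=
  let total := PySem.Int.floordiv (n_disks * (n_disks - 1)) 2
  if 0 ≤ pair_idx ∧ pair_idx < total then
    let r := total - 1 - pair_idx
    let k := PySem.Int.floordiv ((Nat.sqrt (8 * r + 1).toNat : Int) - 1) 2
    let i := n_disks - 2 - k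
    [i, pair_idx - PySem.Int.floordiv (i * (2 * n_disks - i - 1)) 2 + i + 1]
  else []  -- Source B raises ValueError here (outside Pre_)

-- ===== PRECONDITION & SPEC =====
-- Pre_ = exactly the inputs on which A returns normally: a valid pair index for n_disks ≥ 2;
-- on all other inputs A raises ValueError (and so does B).
def Pre_pair_idx_to_disks (pair_idx : Int) (n_disks : Int) : Prop :=
  2 ≤ n_disks ∧ 0 ≤ pair_idx ∧ 2 * pair_idx < n_disks * (n_disks - 1)
instance (pair_idx : Int) (n_disks : Int) : Decidable (Pre_pair_idx_to_disks pair_idx n_disks) := by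
  unfold Pre_pair_idx_to_disks; infer_instance

def pvWitness_pair_idx_to_disks : Int × Int := (2, 4)

def Spec_pair_idx_to_disks (pair_idx : Int) (n_disks : Int) (out : List Int) : Prop := out = pair_idx_to_disks_alt pair_idx n_disks
instance (pair_idx : Int) (n_disks : Int) (out : List Int) : Decidable (Spec_pair_idx_to_disks pair_idx n_disks out) := by unfold Spec_pair_idx_to_disks; infer_instance

-- ===== CLAIM (what is proved, stated in full; the proofs are below) =====
def Claim_equal_pair_idx_to_disks : Prop := ∀ (pair_idx : Int) (n_disks : Int), Dom_pair_idx_to_disks pair_idx n_disks → Pre_pair_idx_to_disks pair_idx n_disks → Spec_pair_idx_to_disks pair_idx n_disks (pair_idx_to_disks pair_idx n_disks)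

-- ===== LEMMAS AND PROOFS =====

-- floor division of an explicitly even integer by 2
theorem pvFdivHalf (a q : Int) (h : a = 2 * q) : PySem.Int.floordiv a 2 = q := by
  rw [PySem.Int.floordiv_eq_iff_of_pos (by norm_num)]
  omega

-- spec function mirroring which row of the triangle the outer loop stops in
def pvFindRow (p n : Int) : Nat → Int → Int → Int × Int
  | 0, i0, count => (i0, count)
  | (m + 1), i0, count =>
      if p < count + (n - 1 - i0) then (i0, count)
      else pvFindRow p n m (i0 + 1) (count + (n - 1 - i0))

-- inner loop finds the pair when it lies in the current row
theorem pvInner_found (p i : Int) : ∀ (m : Nat) (j count : Int),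
    count ≤ p → p < count + (m : Int) →
    pvInnerA p i m j count = (some [i, j + (p - count)], p) := by
  intro m
  induction m with
  | zero => intro j count h1 h2; simp at h2; omega
  | succ m ih =>
      intro j count h1 h2
      by_cases hc : count = p
      · simp [pvInnerA, hc]
      · rw [pvInnerA, if_neg hc]
        rw [ih (j + 1) (count + 1) (by omega) (by push_cast at h2 ⊢; omega)]
        have : j + 1 + (p - (count + 1)) = j + (p - count) := by omega
        rw [this]

-- inner loop exhausts the row when the pair lies further on
theorem pvInner_notfound (p i : Int) : ∀ (m : Nat) (j count : Int),
    count + (m : Int) ≤ p →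
    pvInnerA p i m j count = (none, count + (m : Int)) := by
  intro m
  induction m with
  | zero => intro j count _; simp [pvInnerA]
  | succ m ih =>
      intro j count h1
      rw [pvInnerA, if_neg (by push_cast at h1; omega)]
      rw [ih (j + 1) (count + 1) (by push_cast at h1 ⊢; omega)]
      have : count + 1 + (m : Int) = count + ((m : Nat) + 1 : Nat) := by push_cast; omega
      rw [this]

-- the outer loop returns the pair described by pvFindRow
theorem pvOuter_eq (p n : Int) : ∀ (m : Nat) (i0 count : Int), i0 + (m : Int) = n →
    count ≤ p → 2 * (p - count) < (m : Int) * ((m : Int) - 1) →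
    pvOuterA p n m i0 count =
      some [(pvFindRow p n m i0 count).1,
            (pvFindRow p n m i0 count).1 + 1 + (p - (pvFindRow p n m i0 count).2)] := by
  intro m
  induction m with
  | zero => intro i0 count _ h1 h2; simp at h2; omega
  | succ m ih =>
      intro i0 count hi h1 h2
      have hm : (n - 1 - i0) = (m : Int) := by push_cast at hi; omega
      have hfuel : (n - (i0 + 1)).toNat = m := by omega
      rw [pvOuterA, hfuel]
      by_cases hrow : p < count + (n - 1 - i0)
      · rw [pvInner_found p i0 m (i0 + 1) count h1 (by omega)]
        rw [pvFindRow, if_pos hrow]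
      · rw [pvInner_notfound p i0 m (i0 + 1) count (by omega)]
        rw [pvFindRow, if_neg hrow, hm]
        have hmul : ((m : Int) + 1) * ((m : Int) + 1 - 1) = (m : Int) * ((m : Int) - 1) + 2 * (m : Int) := by ring
        exact ih (i0 + 1) (count + (m : Int)) (by push_cast at hi ⊢; omega) (by omega)
             (by push_cast at h2; omega)

-- pvFindRow's result row satisfies the triangular bracket
theorem pvFindRow_spec (p n : Int) : ∀ (m : Nat) (i0 count : Int), i0 + (m : Int) = n →
    0 ≤ i0 → count ≤ p → 2 * (p - count) < (m : Int) * ((m : Int) - 1) →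
    2 * count = i0 * (2 * n - i0 - 1) →
    0 ≤ (pvFindRow p n m i0 count).1 ∧ (pvFindRow p n m i0 count).1 ≤ n - 2 ∧
    2 * (pvFindRow p n m i0 count).2 = (pvFindRow p n m i0 count).1 * (2 * n - (pvFindRow p n m i0 count).1 - 1) ∧
    (pvFindRow p n m i0 count).2 ≤ p ∧ p < (pvFindRow p n m i0 count).2 + (n - 1 - (pvFindRow p n m i0 count).1) := by
  intro m
  induction m with
  | zero => intro i0 count _ _ h1 h2 _; simp at h2; omega
  | succ m ih =>
      intro i0 count hi hpos h1 h2 hinv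
      have hm : (n - 1 - i0) = (m : Int) := by push_cast at hi; omega
      by_cases hrow : p < count + (n - 1 - i0)
      · rw [pvFindRow, if_pos hrow]
        refine ⟨hpos, by omega, hinv, h1, hrow⟩
      · rw [pvFindRow, if_neg hrow]
        have hkey : (i0 + 1) * (2 * n - (i0 + 1) - 1) = i0 * (2 * n - i0 - 1) + 2 * (n - 1 - i0) := by ring
        have hmul : ((m : Int) + 1) * ((m : Int) + 1 - 1) = (m : Int) * ((m : Int) - 1) + 2 * (m : Int) := by ring
        exact ih (i0 + 1) (count + (n - 1 - i0)) (by push_cast at hi ⊢; omega) (by omega)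
          (by omega) (by rw [hm]; push_cast at h2; omega) (by omega)

-- inverse triangular bracket of Nat.sqrt
theorem pvSqrtBracket (r : Nat) :
    let k := (Nat.sqrt (8 * r + 1) - 1) / 2
    k * (k + 1) ≤ 2 * r ∧ 2 * r < (k + 1) * (k + 2) := by
  intro k
  set s := Nat.sqrt (8 * r + 1) with hs
  have hlow : s * s ≤ 8 * r + 1 := by have := Nat.sqrt_le' (8 * r + 1); nlinarith [this]
  have hhigh : 8 * r + 1 < (s + 1) * (s + 1) := by have := Nat.lt_succ_sqrt' (8 * r + 1); nlinarith [this]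
  have hs1 : 1 ≤ s := by
    by_contra h
    interval_cases s
    omega
  have hk : s = 2 * k + 1 ∨ s = 2 * k + 2 := by
    have h1 : 2 * ((s - 1) / 2) ≤ s - 1 := Nat.mul_div_le (s - 1) 2
    have h2 : s - 1 < 2 * ((s - 1) / 2) + 2 := by omega
    omega
  constructor
  · have : (2 * k + 1) * (2 * k + 1) ≤ s * s := by
      apply Nat.mul_le_mul <;> omega
    nlinarith
  · have : (s + 1) * (s + 1) ≤ (2 * k + 3) * (2 * k + 3) := by
      apply Nat.mul_le_mul <;> omega
    nlinarith

-- uniqueness of the triangular bracket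
theorem pvBracketUnique (r k k' : Int) (hk : 0 ≤ k) (hk' : 0 ≤ k')
    (h1 : k * (k + 1) ≤ 2 * r) (h2 : 2 * r < (k + 1) * (k + 2))
    (h1' : k' * (k' + 1) ≤ 2 * r) (h2' : 2 * r < (k' + 1) * (k' + 2)) : k = k' := by
  rcases lt_trichotomy k k' with h | h | h
  · exfalso; nlinarith
  · exact h
  · exfalso; nlinarith

-- ===== VERDICT (by name: the statement is the Claim_ definition above) =====
theorem pair_idx_to_disks_spec : Claim_equal_pair_idx_to_disks := by
  intro p n _ hpre
  obtain ⟨hn, hp0, hpT⟩ := hpre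
  -- the total n*(n-1)//2
  obtain ⟨q, hq⟩ : ∃ q : Int, n * (n - 1) = 2 * q := by
    obtain ⟨t, ht⟩ := Int.even_mul_succ_self (n - 1)
    exact ⟨t, by linarith [ht]⟩
  have hT : PySem.Int.floordiv (n * (n - 1)) 2 = q := pvFdivHalf _ q hq
  have hpq : p < q := by omega
  have hm0 : ((n.toNat : Int)) = n := by omega
  -- A's loop result, characterised through pvFindRow
  have houter := pvOuter_eq p n n.toNat 0 0 (by omega) hp0 (by rw [hm0]; linarith)
  have hspec := pvFindRow_spec p n n.toNat 0 0 (by omega) le_rfl hp0 (by rw [hm0]; linarith)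
    (by ring)
  set i := (pvFindRow p n n.toNat 0 0).1 with hidef
  set c := (pvFindRow p n n.toNat 0 0).2 with hcdef
  obtain ⟨hi0, hin, hc2, hcp, hpc⟩ := hspec
  -- B's sqrt-derived row index equals i, by uniqueness of the triangular bracket
  set rn : Nat := (q - 1 - p).toNat with hrn
  have hrni : (rn : Int) = q - 1 - p := by omega
  set kn : Nat := (Nat.sqrt (8 * rn + 1) - 1) / 2 with hkn
  have hbr := pvSqrtBracket rn
  have hbr1 : (kn : Int) * ((kn : Int) + 1) ≤ 2 * (q - 1 - p) := by
    rw [← hrni]; exact_mod_cast hbr.1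
  have hbr2 : 2 * (q - 1 - p) < ((kn : Int) + 1) * ((kn : Int) + 2) := by
    rw [← hrni]; exact_mod_cast hbr.2
  have hA1 : (n - 2 - i + 1) * (n - 2 - i + 2) = 2 * q - 2 * c := by
    linear_combination hq + hc2
  have hA2 : (n - 2 - i) * (n - 2 - i + 1) = 2 * q - 2 * c - 2 * (n - 1 - i) := by
    linear_combination hq + hc2
  have hkeq : (n - 2 - i) = (kn : Int) := by
    refine pvBracketUnique (q - 1 - p) _ _ (by omega) (by positivity) ?_ ?_ hbr1 hbr2
    · rw [hA2]; linarith
    · rw [hA1]; linarith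
  -- evaluate port A
  unfold pair_idx_to_disks
  rw [houter]
  -- evaluate port B
  unfold Spec_pair_idx_to_disks pair_idx_to_disks_alt
  simp only [hT]
  rw [if_pos ⟨hp0, hpq⟩]
  have hsqrt1 : 1 ≤ Nat.sqrt (8 * rn + 1) := Nat.sqrt_pos.mpr (by omega)
  have hkB : PySem.Int.floordiv ((Nat.sqrt (8 * (q - 1 - p) + 1).toNat : Int) - 1) 2 = (kn : Int) := by
    have h8 : (8 * (q - 1 - p) + 1).toNat = 8 * rn + 1 := by omega
    rw [h8]
    have hsub : ((Nat.sqrt (8 * rn + 1) : Int)) - 1 = ((Nat.sqrt (8 * rn + 1) - 1 : Nat) : Int) := by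
      omega
    rw [hsub]
    exact_mod_cast PySem.Int.floordiv_natCast (Nat.sqrt (8 * rn + 1) - 1) 2
  rw [hkB]
  rw [show n - 2 - (kn : Int) = i by omega]
  have hoff : PySem.Int.floordiv (i * (2 * n - i - 1)) 2 = c := pvFdivHalf _ c hc2.symm
  rw [hoff]
  simp only [Option.getD_some]
  have hj : i + 1 + (p - c) = p - c + i + 1 := by omega
  rw [hj]
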